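-- pv_equiv track=rewrite | github.com/guo-xuan/SiprosBenchmark | SiprosEnsemble/sipros_rf_filtering.py | protein_type
-- ===== SOURCE A (Python) =====
-- label_train_str = 'Rev_' # 'Rev_'
--
-- label_test_str = 'TestRev_' # 'Shu_'
--
-- label_reserve_str = 'Rev_2_'
--
-- LabelFwd = 1
--
-- LabelRevTrain = 2
--
-- LabelTest = 3
--
-- LabelRevReserve = 4
--
-- def protein_type(protein_sequence, lProtein=None):
--     sProteins = protein_sequence.replace('{', '')
--     sProteins = sProteins.replace('}', '')
--     asProteins = sProteins.split(',')
--     if lProtein != None: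
--         del lProtein[:]
--         for sProtein in asProteins:
--             sProtein = sProtein.strip()
--             if sProtein not in lProtein:
--                 lProtein.extend(asProteins[:])
--     for sProtein in asProteins:
--         if not (sProtein.startswith(label_train_str) or sProtein.startswith(label_test_str)):
--             return LabelFwd
--     for sProtein in asProteins:
--         if sProtein.startswith(label_test_str):
--             return LabelTest
--     if label_reserve_str != '':
--         for sProtein in asProteins:
--             if sProtein.startswith(label_reserve_str):
--                 return LabelRevReserve
--     return LabelRevTrain
-- ===== SOURCE B (Python) =====
-- label_train_str = 'Rev_'
-- label_test_str = 'TestRev_'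
-- label_reserve_str = 'Rev_2_'
-- LabelFwd = 1
-- LabelRevTrain = 2
-- LabelTest = 3
-- LabelRevReserve = 4
--
-- def protein_type(protein_sequence, lProtein=None):
--     sProteins = protein_sequence.replace('{', '')
--     sProteins = sProteins.replace('}', '')
--     asProteins = sProteins.split(',')
--     if lProtein != None:
--         del lProtein[:]
--         for sProtein in asProteins:
--             sProtein = sProtein.strip()
--             if sProtein not in lProtein:
--                 lProtein.extend(asProteins[:])
--     has_non_rev = has_test = has_reserve = False
--     for sProtein in asProteins:
--         if not (sProtein.startswith(label_train_str) or sProtein.startswith(label_test_str)):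
--             has_non_rev = True
--         if sProtein.startswith(label_test_str):
--             has_test = True
--         if sProtein.startswith(label_reserve_str):
--             has_reserve = True
--     if has_non_rev:
--         return LabelFwd
--     if has_test:
--         return LabelTest
--     if label_reserve_str != '' and has_reserve:
--         return LabelRevReserve
--     return LabelRevTrain
-- ===== Notes on version B (the rewrite author's own statement) =====
-- stated objective: simpler
-- what changed: The three sequential early-returning scans over asProteins are replaced by a single pass that accumulates three boolean flags, followed by one flag-based decision.
import Mathlib
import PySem

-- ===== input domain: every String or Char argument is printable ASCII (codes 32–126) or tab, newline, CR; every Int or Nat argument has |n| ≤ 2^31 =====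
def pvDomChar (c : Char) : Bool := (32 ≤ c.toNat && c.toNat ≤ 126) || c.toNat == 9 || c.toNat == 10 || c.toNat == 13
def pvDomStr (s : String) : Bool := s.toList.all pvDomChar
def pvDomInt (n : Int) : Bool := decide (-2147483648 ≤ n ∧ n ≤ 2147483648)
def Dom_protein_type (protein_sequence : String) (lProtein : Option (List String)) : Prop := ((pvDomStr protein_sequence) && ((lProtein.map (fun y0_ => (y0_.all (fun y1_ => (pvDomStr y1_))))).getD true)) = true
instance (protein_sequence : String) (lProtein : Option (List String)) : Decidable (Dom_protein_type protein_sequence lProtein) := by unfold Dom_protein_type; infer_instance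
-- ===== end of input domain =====

-- B replaces A's three sequential early-returning scans by a single flag-accumulating pass (objective: simpler).
-- A mutates lProtein in place (cleared and refilled); the equivalence proved here is about the RETURN value only
-- (B performs the same mutation in Source B; in Lean the mutation does not affect the Int result, so both ports
-- compute the lProtein-block's final list and discard it).

-- ===== PORT A =====
-- shared string cleaning + split: sProteins.replace('{','').replace('}','').split(',')
def ptClean (protein_sequence : String) : List String :=
  (PySem.Str.split? (PySem.Str.replace (PySem.Str.replace protein_sequence "{" "") "}" "") ",").getD []  -- sep "," is nonempty, so split? is always some

-- the lProtein side-effect block of A: del lProtein[:]; for …: if strip(p) not in acc: acc.extend(asProteins[:])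
def ptSideEffect (asProteins : List String) : List String :=
  asProteins.foldl (fun acc p =>
    if (PySem.Str.strip p) ∈ acc then acc else acc ++ asProteins) []

-- third loop of A: for p in asProteins: if p.startswith('Rev_2_'): return 4 / return 2
def ptLoop3 : List String → Int
  | [] => 2
  | p :: rest => if PySem.Str.startswith p "Rev_2_" then 4 else ptLoop3 rest

-- second loop of A: for p: if p.startswith('TestRev_'): return 3, then the label_reserve_str guard
def ptLoop2 (all : List String) : List String → Int
  | [] => if ("Rev_2_" : String) ≠ "" then ptLoop3 all else 2
  | p :: rest => if PySem.Str.startswith p "TestRev_" then 3 else ptLoop2 all rest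

-- first loop of A: for p: if not (p.startswith('Rev_') or p.startswith('TestRev_')): return 1
def ptLoop1 (all : List String) : List String → Int
  | [] => ptLoop2 all all
  | p :: rest =>
      if !(PySem.Str.startswith p "Rev_" || PySem.Str.startswith p "TestRev_") then 1
      else ptLoop1 all rest

def protein_type (protein_sequence : String) (lProtein : Option (List String)) : Int :=
  let asProteins := ptClean protein_sequence
  let _ := match lProtein with           -- in-place mutation: value discarded, return unaffected
    | some _ => some (ptSideEffect asProteins)
    | none => none
  ptLoop1 asProteins asProteins

-- ===== PORT B =====
def ptStep (f : Bool × Bool × Bool) (p : String) : Bool × Bool × Bool :=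
  ( f.1 || !(PySem.Str.startswith p "Rev_" || PySem.Str.startswith p "TestRev_")
  , f.2.1 || PySem.Str.startswith p "TestRev_"
  , f.2.2 || PySem.Str.startswith p "Rev_2_" )

def protein_type_alt (protein_sequence : String) (lProtein : Option (List String)) : Int :=
  let asProteins := ptClean protein_sequence
  let _ := match lProtein with           -- same in-place mutation as in Source B; return unaffected
    | some _ => some (ptSideEffect asProteins)
    | none => none
  let f := asProteins.foldl ptStep (false, false, false)
  if f.1 then 1
  else if f.2.1 then 3
  else if ("Rev_2_" : String) ≠ "" && f.2.2 then 4
  else 2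

-- ===== PRECONDITION & SPEC =====
def Spec_protein_type (protein_sequence : String) (lProtein : Option (List String)) (out : Int) : Prop := out = protein_type_alt protein_sequence lProtein
instance (protein_sequence : String) (lProtein : Option (List String)) (out : Int) : Decidable (Spec_protein_type protein_sequence lProtein out) := by unfold Spec_protein_type; infer_instance

-- ===== CLAIM (what is proved, stated in full; the proofs are below) =====
def Claim_equal_protein_type : Prop := ∀ (protein_sequence : String) (lProtein : Option (List String)), Dom_protein_type protein_sequence lProtein → Spec_protein_type protein_sequence lProtein (protein_type protein_sequence lProtein)

-- ===== LEMMAS AND PROOFS =====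

theorem ptIteOr {c d : Prop} [Decidable c] [Decidable d] {α : Type} (x y : α) :
    (if c then x else if d then x else y) = if c ∨ d then x else y := by
  by_cases hc : c <;> by_cases hd : d <;> simp [hc, hd]

theorem ptLoop3_any (l : List String) :
    ptLoop3 l = if l.any (fun p => PySem.Str.startswith p "Rev_2_") then 4 else 2 := by
  induction l with
  | nil => simp [ptLoop3]
  | cons p rest ih =>
      simp [ptLoop3, ih, ptIteOr]

theorem ptLoop2_any (all l : List String) :
    ptLoop2 all l = if l.any (fun p => PySem.Str.startswith p "TestRev_") then 3 else ptLoop3 all := by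
  induction l with
  | nil => simp [ptLoop2]
  | cons p rest ih =>
      simp [ptLoop2, ih, ptIteOr]

theorem ptLoop1_any (all l : List String) :
    ptLoop1 all l =
      if l.any (fun p => !(PySem.Str.startswith p "Rev_" || PySem.Str.startswith p "TestRev_"))
      then 1 else ptLoop2 all all := by
  induction l with
  | nil => simp [ptLoop1]
  | cons p rest ih =>
      simp [ptLoop1, ih, ptIteOr]

theorem ptFoldl_flags (l : List String) (b1 b2 b3 : Bool) :
    l.foldl ptStep (b1, b2, b3) =
      ( b1 || l.any (fun p => !(PySem.Str.startswith p "Rev_" || PySem.Str.startswith p "TestRev_"))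
      , b2 || l.any (fun p => PySem.Str.startswith p "TestRev_")
      , b3 || l.any (fun p => PySem.Str.startswith p "Rev_2_") ) := by
  induction l generalizing b1 b2 b3 with
  | nil => simp
  | cons p rest ih => simp [ptStep, ih, Bool.or_assoc]

-- ===== VERDICT (by name: the statement is the Claim_ definition above) =====
theorem protein_type_spec : Claim_equal_protein_type := by
  intro protein_sequence lProtein _
  show protein_type protein_sequence lProtein = protein_type_alt protein_sequence lProtein
  simp only [protein_type, protein_type_alt, ptLoop1_any, ptLoop2_any, ptLoop3_any,
    ptFoldl_flags, Bool.false_or]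
  have h : ("Rev_2_" : String) ≠ "" := by decide
  simp only [h, ne_eq, not_false_eq_true, decide_true, Bool.true_and]
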